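-- pv_equiv track=rewrite | github.com/foundation-int-tech-team/sherlock | sherlock/lib/wikidot.py | compute_vote
-- ===== SOURCE A (Python) =====
-- def compute_vote(votes, without="0"):
--     i = 0
--     for (user, vote) in votes.items():
--         if user == without:
--             continue
--
--         if vote == '+':
--             i += 1
--         elif vote == '-':
--             i -= 1
--
--     return i
-- ===== SOURCE B (Python) =====
-- def compute_vote(votes, without="0"):
--     vals = [v for u, v in votes.items() if u != without]
--     return vals.count('+') - vals.count('-')
-- ===== Notes on version B (the rewrite author's own statement) =====
-- stated objective: idiomatic
-- what changed: B collects the surviving vote symbols with a comprehension and derives the result as count('+') - count('-') at the end, instead of A's single running net accumulator updated branch by branch.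
import Mathlib
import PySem

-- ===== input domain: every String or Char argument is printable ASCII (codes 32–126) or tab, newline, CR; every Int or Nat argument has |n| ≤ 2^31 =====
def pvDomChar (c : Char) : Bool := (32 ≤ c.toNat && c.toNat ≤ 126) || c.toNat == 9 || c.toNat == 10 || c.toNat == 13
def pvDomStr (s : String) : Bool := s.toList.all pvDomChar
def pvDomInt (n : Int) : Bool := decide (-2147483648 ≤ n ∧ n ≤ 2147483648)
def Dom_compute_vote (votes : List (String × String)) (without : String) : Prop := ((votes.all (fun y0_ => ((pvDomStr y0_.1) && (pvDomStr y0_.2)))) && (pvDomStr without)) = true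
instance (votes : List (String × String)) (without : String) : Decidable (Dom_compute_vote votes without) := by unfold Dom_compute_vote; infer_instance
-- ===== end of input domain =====

-- B replaces A's running net accumulator by counting the surviving '+' and '-' symbols and subtracting at the end (idiomatic restructuring, same cost).

-- ===== PORT A =====
def compute_vote (votes : List (String × String)) (without : String) : Int :=
  (PySem.Dict.ofList votes).items.foldl
    (fun i uv =>
      if uv.1 == without then i
      else if uv.2 == "+" then i + 1
      else if uv.2 == "-" then i - 1
      else i) 0

-- ===== PORT B =====
def compute_vote_alt (votes : List (String × String)) (without : String) : Int :=
  let vals := ((PySem.Dict.ofList votes).items.filter (fun uv => uv.1 != without)).map (·.2)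
  (PySem.List.count vals "+" : Int) - (PySem.List.count vals "-" : Int)

-- ===== PRECONDITION & SPEC =====
def Spec_compute_vote (votes : List (String × String)) (without : String) (out : Int) : Prop := out = compute_vote_alt votes without
instance (votes : List (String × String)) (without : String) (out : Int) : Decidable (Spec_compute_vote votes without out) := by unfold Spec_compute_vote; infer_instance

-- ===== CLAIM (what is proved, stated in full; the proofs are below) =====
def Claim_equal_compute_vote : Prop := ∀ (votes : List (String × String)) (without : String), Dom_compute_vote votes without → Spec_compute_vote votes without (compute_vote votes without)

-- ===== LEMMAS AND PROOFS =====

lemma foldA_eq (without : String) :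
    ∀ (l : List (String × String)) (i : Int),
      l.foldl
        (fun i uv =>
          if uv.1 == without then i
          else if uv.2 == "+" then i + 1
          else if uv.2 == "-" then i - 1
          else i) i
      = i + ((((l.filter (fun uv => uv.1 != without)).map (·.2)).count "+" : Int)
             - (((l.filter (fun uv => uv.1 != without)).map (·.2)).count "-" : Int)) := by
  intro l
  induction l with
  | nil => intro i; simp
  | cons hd tl ih =>
    intro i
    rw [List.foldl_cons]
    by_cases hu : hd.1 == without
    · rw [if_pos hu, ih]
      have hfu : (hd.1 != without) = false := by simp [bne, hu]
      rw [List.filter_cons, hfu]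
      simp
    · have hfu : (hd.1 != without) = true := by simp [bne]; exact fun h => hu (by simp [h])
      rw [if_neg hu]
      by_cases hp : hd.2 == "+"
      · have hep : hd.2 = "+" := eq_of_beq hp
        rw [if_pos hp, ih, List.filter_cons, hfu]
        simp only [if_true, List.map_cons, List.count_cons, hep]
        simp
        ring
      · rw [if_neg hp]
        by_cases hm : hd.2 == "-"
        · have hem : hd.2 = "-" := eq_of_beq hm
          rw [if_pos hm, ih, List.filter_cons, hfu]
          simp only [if_true, List.map_cons, List.count_cons, hem]
          simp
          ring
        · have hnp : hd.2 ≠ "+" := fun h => hp (by simp [h])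
          have hnm : hd.2 ≠ "-" := fun h => hm (by simp [h])
          rw [if_neg hm, ih, List.filter_cons, hfu]
          simp [hnp, hnm]

-- ===== VERDICT (by name: the statement is the Claim_ definition above) =====
theorem compute_vote_spec : Claim_equal_compute_vote := by
  intro votes without _
  unfold Spec_compute_vote compute_vote compute_vote_alt
  rw [foldA_eq]
  simp [PySem.List.count_eq]
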